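-- pv_equiv track=rewrite | github.com/codewithdaksh1/PALB-1-Python-Programming | Program List 3 .py | isPalinArray
-- ===== SOURCE A (Python) =====
-- def isPalinArray(arr):
--
--     for num in arr:
--         temp = num
--         rev = 0
--
--         while temp > 0:
--             rev = rev * 10 + temp % 10
--             temp //= 10
--
--         if rev != num:
--             return False
--
--     return True
-- ===== SOURCE B (Python) =====
-- def isPalinArray(arr):
--     return all(str(num) == str(num)[::-1] for num in arr)
-- ===== Notes on version B (the rewrite author's own statement) =====
-- stated objective: idiomatic
-- what changed: Replaces the arithmetic while-loop digit reversal per element with a single all() over string-palindrome checks str(num) == str(num)[::-1], eliminating the inner loop and the early-return scaffolding.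
import Mathlib
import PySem

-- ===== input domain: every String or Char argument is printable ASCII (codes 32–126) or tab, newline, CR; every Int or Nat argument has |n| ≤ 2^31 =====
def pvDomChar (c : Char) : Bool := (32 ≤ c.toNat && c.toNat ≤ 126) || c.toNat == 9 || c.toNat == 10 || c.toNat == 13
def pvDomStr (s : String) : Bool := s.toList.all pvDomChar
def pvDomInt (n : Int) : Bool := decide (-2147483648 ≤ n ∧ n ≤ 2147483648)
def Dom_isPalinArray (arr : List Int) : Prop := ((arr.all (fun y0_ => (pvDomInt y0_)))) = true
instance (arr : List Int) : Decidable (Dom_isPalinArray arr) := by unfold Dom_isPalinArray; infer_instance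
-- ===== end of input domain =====

-- B replaces A's arithmetic while-loop digit reversal per element with an all() over
-- string-palindrome checks str(num) == str(num)[::-1] (idiomatic; no inner loop).


-- ===== PORT A =====
-- the inner 'while temp > 0: rev = rev*10 + temp%10; temp //= 10'
def pvRevLoop (temp rev : Int) : Int :=
  if h : 0 < temp then
    pvRevLoop (PySem.Int.floordiv temp 10) (rev * 10 + PySem.Int.mod temp 10)
  else rev
termination_by temp.toNat
decreasing_by
  have h10 : PySem.Int.floordiv temp 10 = temp / 10 :=
    PySem.Int.floordiv_eq_ediv_of_pos (by norm_num)
  rw [h10]; omega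

def isPalinArray (arr : List Int) : Bool :=
  match arr with
  | [] => true
  | num :: rest =>
      let rev := pvRevLoop num 0
      if rev ≠ num then false else isPalinArray rest

-- ===== PORT B =====
-- all(str(num) == str(num)[::-1] for num in arr); s[::-1] is reverse (PySem.Str.slice?_none_none_neg_one),
-- the comparison is done on the code-point lists (PySem.Int.toChars n = (str(n)).toList)
def isPalinArray_alt (arr : List Int) : Bool :=
  arr.all (fun num => PySem.Int.toChars num == (PySem.Int.toChars num).reverse)

-- ===== PRECONDITION & SPEC =====
def Spec_isPalinArray (arr : List Int) (out : Bool) : Prop := out = isPalinArray_alt arr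
instance (arr : List Int) (out : Bool) : Decidable (Spec_isPalinArray arr out) := by unfold Spec_isPalinArray; infer_instance

-- ===== CLAIM (what is proved, stated in full; the proofs are below) =====
def Claim_equal_isPalinArray : Prop := ∀ (arr : List Int), Dom_isPalinArray arr → Spec_isPalinArray arr (isPalinArray arr)

-- ===== LEMMAS AND PROOFS =====

-- the while-loop computes the digit-reversal: rev shifted left by the digit count, plus digits reversed
lemma pvRevLoop_nat (m : Nat) : ∀ rev : Int,
    pvRevLoop (m : Int) rev
      = rev * (10 : Int) ^ (Nat.digits 10 m).length + (Nat.ofDigits 10 (Nat.digits 10 m).reverse : Nat) := by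
  induction m using Nat.strong_induction_on with
  | _ m ih =>
    intro rev
    rcases Nat.eq_zero_or_pos m with hm | hm
    · subst hm
      rw [pvRevLoop]
      simp
    · rw [pvRevLoop]
      have hpos : (0 : Int) < (m : Int) := by exact_mod_cast hm
      rw [dif_pos hpos]
      have hfd : PySem.Int.floordiv (m : Int) 10 = ((m / 10 : Nat) : Int) := by
        exact_mod_cast PySem.Int.floordiv_natCast m 10
      have hmd : PySem.Int.mod (m : Int) 10 = ((m % 10 : Nat) : Int) := by
        exact_mod_cast PySem.Int.mod_natCast m 10
      rw [hfd, hmd, ih (m / 10) (Nat.div_lt_self hm (by norm_num))]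
      rw [Nat.digits_def' (by norm_num : 1 < 10) hm]
      simp only [List.reverse_cons, List.length_cons, Nat.ofDigits_append, Nat.ofDigits_cons,
        Nat.ofDigits_nil, List.length_reverse]
      push_cast
      ring

-- definitional step equation of core's Nat.toDigitsCore at base 10
lemma toDigitsCore_succ (f n : Nat) (ds : List Char) :
    Nat.toDigitsCore 10 (f + 1) n ds
      = if n / 10 = 0 then Nat.digitChar (n % 10) :: ds
        else Nat.toDigitsCore 10 f (n / 10) (Nat.digitChar (n % 10) :: ds) := rfl

-- core-fuel characterisation of Nat.toDigitsCore at base 10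
lemma toDigitsCore_eq : ∀ (f n : Nat) (ds : List Char), n < f →
    Nat.toDigitsCore 10 f n ds
      = ((Nat.digits 10 n).map Nat.digitChar).reverse ++ (if n = 0 then '0' :: ds else ds) := by
  intro f
  induction f with
  | zero => intro n ds h; omega
  | succ f ih =>
    intro n ds _h
    rcases Nat.eq_zero_or_pos n with hn | hn
    · subst hn
      rw [toDigitsCore_succ]
      have h0 : Nat.digitChar (0 % 10) = '0' := by decide
      simp [h0]
    · have hdig := Nat.digits_def' (by norm_num : 1 < 10) hn
      have hne : n ≠ 0 := by omega
      rw [toDigitsCore_succ]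
      by_cases hq : n / 10 = 0
      · rw [if_pos hq, hdig, hq]
        simp [hne]
      · rw [if_neg hq, ih (n / 10) _ (by omega)]
        rw [if_neg hq, hdig]
        simp [hne]

lemma toDigits_eq (n : Nat) (hn : 0 < n) :
    Nat.toDigits 10 n = ((Nat.digits 10 n).map Nat.digitChar).reverse := by
  rw [Nat.toDigits, toDigitsCore_eq (n + 1) n [] (by omega), if_neg hn.ne']
  simp

lemma digitChar_inj {a b : Nat} (ha : a < 10) (hb : b < 10)
    (h : Nat.digitChar a = Nat.digitChar b) : a = b := by
  interval_cases a <;> interval_cases b <;> first | rfl | exact absurd h (by decide)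

lemma map_digitChar_inj : ∀ {L M : List Nat}, (∀ x ∈ L, x < 10) → (∀ x ∈ M, x < 10) →
    List.map Nat.digitChar L = List.map Nat.digitChar M → L = M := by
  intro L
  induction L with
  | nil => intro M _ _ h; cases M <;> simp_all
  | cons a t ih =>
    intro M hL hM h
    cases M with
    | nil => simp_all
    | cons b u =>
      simp only [List.map_cons, List.cons.injEq] at h
      have := digitChar_inj (hL a (by simp)) (hM b (by simp)) h.1
      have := ih (fun x hx => hL x (by simp [hx])) (fun x hx => hM x (by simp [hx])) h.2
      simp_all

lemma ofDigits_inj : ∀ {L M : List Nat}, L.length = M.length →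
    (∀ x ∈ L, x < 10) → (∀ x ∈ M, x < 10) →
    Nat.ofDigits 10 L = Nat.ofDigits 10 M → L = M := by
  intro L
  induction L with
  | nil => intro M hlen _ _ _; cases M <;> simp_all
  | cons a t ih =>
    intro M hlen hL hM h
    cases M with
    | nil => simp_all
    | cons b u =>
      rw [Nat.ofDigits_cons, Nat.ofDigits_cons] at h
      have ha := hL a (by simp)
      have hb := hM b (by simp)
      have hab : a = b := by omega
      have ht : Nat.ofDigits 10 t = Nat.ofDigits 10 u := by omega
      have := ih (by simpa using hlen) (fun x hx => hL x (by simp [hx]))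
        (fun x hx => hM x (by simp [hx])) ht
      simp_all

lemma digits_lt_ten {n : Nat} : ∀ x ∈ Nat.digits 10 n, x < 10 := by
  intro x hx
  exact Nat.digits_lt_base (by norm_num) hx

-- last character of str(m) for m > 0 is a decimal digit, hence not '-'
lemma toDigits_ne_dash_rev (m : Nat) (hm : 0 < m) :
    '-' :: Nat.toDigits 10 m ≠ ('-' :: Nat.toDigits 10 m).reverse := by
  rw [toDigits_eq m hm]
  intro h
  have hd := Nat.digits_def' (by norm_num : 1 < 10) hm
  rw [hd] at h
  simp only [List.map_cons, List.reverse_cons, List.reverse_append, List.reverse_reverse,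
    List.reverse_cons] at h
  have hhead : '-' = Nat.digitChar (m % 10) := by
    have := congrArg (fun l => l.head?) h
    simpa using this
  have hlt : m % 10 < 10 := Nat.mod_lt _ (by norm_num)
  interval_cases h10 : m % 10 <;> exact absurd hhead (by decide)

-- per-element agreement: the arithmetic check equals the string check
lemma elem_eq (n : Int) :
    (pvRevLoop n 0 = n) ↔ (PySem.Int.toChars n = (PySem.Int.toChars n).reverse) := by
  rcases lt_trichotomy n 0 with hneg | hzero | hpos
  · rw [pvRevLoop, dif_neg (by omega)]
    have hc : PySem.Int.toChars n = '-' :: Nat.toDigits 10 n.natAbs := by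
      simp [PySem.Int.toChars, hneg]
    rw [hc]
    constructor
    · intro h; omega
    · intro h; exact absurd h (toDigits_ne_dash_rev _ (by omega))
  · subst hzero
    rw [pvRevLoop, dif_neg (by omega)]
    simp [PySem.Int.toChars, Nat.toDigits, Nat.toDigitsCore]
  · have hmn : ((n.toNat : Nat) : Int) = n := Int.toNat_of_nonneg hpos.le
    have hm : 0 < n.toNat := by omega
    have h1 : pvRevLoop n 0 = (Nat.ofDigits 10 (Nat.digits 10 n.toNat).reverse : Nat) := by
      conv_lhs => rw [← hmn]
      rw [pvRevLoop_nat]; simp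
    have h2 : PySem.Int.toChars n = ((Nat.digits 10 n.toNat).map Nat.digitChar).reverse := by
      rw [PySem.Int.toChars, if_neg (by omega : ¬ n < 0)]
      exact toDigits_eq _ hm
    rw [h1, h2, List.reverse_reverse]
    constructor
    · intro h
      have hx : Nat.ofDigits 10 (Nat.digits 10 n.toNat).reverse = n.toNat := by
        exact_mod_cast h.trans hmn.symm
      have hval : Nat.ofDigits 10 (Nat.digits 10 n.toNat).reverse
          = Nat.ofDigits 10 (Nat.digits 10 n.toNat) := by
        rw [hx, Nat.ofDigits_digits]
      have hLL : (Nat.digits 10 n.toNat).reverse = Nat.digits 10 n.toNat :=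
        ofDigits_inj (by simp) (fun x hx => digits_lt_ten x (by simpa using hx))
          digits_lt_ten hval
      rw [← List.map_reverse, hLL]
    · intro h
      have hLL : (Nat.digits 10 n.toNat).reverse = Nat.digits 10 n.toNat :=
        map_digitChar_inj (fun x hx => digits_lt_ten x (by simpa using hx))
          digits_lt_ten (by rw [List.map_reverse, h])
      rw [hLL, Nat.ofDigits_digits]
      exact hmn

-- A's recursion over the list equals B's all()
lemma main_eq : ∀ arr : List Int, isPalinArray arr = isPalinArray_alt arr := by
  intro arr
  induction arr with
  | nil => rfl
  | cons num rest ih =>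
    show (if pvRevLoop num 0 ≠ num then false else isPalinArray rest) = _
    simp only [isPalinArray_alt, List.all_cons]
    by_cases h : pvRevLoop num 0 = num
    · have hb : (PySem.Int.toChars num == (PySem.Int.toChars num).reverse) = true :=
        beq_iff_eq.mpr ((elem_eq num).mp h)
      rw [if_neg (by simpa using h), hb, ih, isPalinArray_alt]
      simp
    · have hb : (PySem.Int.toChars num == (PySem.Int.toChars num).reverse) = false :=
        beq_eq_false_iff_ne.mpr (fun hc => h ((elem_eq num).mpr hc))
      rw [if_pos (by simpa using h), hb]
      simp

-- ===== VERDICT (by name: the statement is the Claim_ definition above) =====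
theorem isPalinArray_spec : Claim_equal_isPalinArray := by
  intro arr _
  exact main_eq arr
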